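-- pv_equiv track=rewrite | github.com/charbelc15/IDPA_p2 | Project2_parts/Part1_CompareVectors/vector_tools/vector_to_dict.py | vector_to_dict
-- ===== SOURCE A (Python) =====
-- def vector_to_dict(vector):
--     dict={}
--     for element in vector:
--         key=element[0]
--         val=element[1]
--         if key in dict.keys(): # 2 elements with the same key --> add their values
--             dict[key] +=val
--         else:
--             dict[key]=val
--
--     return sorted(dict.items())
-- ===== SOURCE B (Python) =====
-- def vector_to_dict(vector):
--     # sort by key first, then one linear merge pass over adjacent equal keys
--     out = []
--     for element in sorted(vector, key=lambda e: e[0]):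
--         key = element[0]
--         val = element[1]
--         if out and out[-1][0] == key:
--             out[-1] = (key, out[-1][1] + val)
--         else:
--             out.append((key, val))
--     return out
-- ===== Notes on version B (the rewrite author's own statement) =====
-- stated objective: alternative
-- what changed: Replaces the dict-accumulate-then-sort-items algorithm by sort-by-key-first followed by a single linear pass merging adjacent entries with equal keys (no dict at all).
import Mathlib
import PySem

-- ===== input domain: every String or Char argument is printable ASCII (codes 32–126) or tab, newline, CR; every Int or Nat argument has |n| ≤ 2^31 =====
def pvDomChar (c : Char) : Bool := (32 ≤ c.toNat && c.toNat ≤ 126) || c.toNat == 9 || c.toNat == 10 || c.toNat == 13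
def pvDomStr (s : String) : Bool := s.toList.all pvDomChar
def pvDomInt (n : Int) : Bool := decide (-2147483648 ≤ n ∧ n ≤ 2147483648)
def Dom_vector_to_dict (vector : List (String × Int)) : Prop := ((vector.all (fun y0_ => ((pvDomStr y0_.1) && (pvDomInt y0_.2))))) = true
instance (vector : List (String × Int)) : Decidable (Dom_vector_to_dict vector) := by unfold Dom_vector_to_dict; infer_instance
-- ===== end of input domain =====

-- B replaces A's dict-accumulate-then-sort-items by sort-by-key-first plus one linear merge pass
-- over adjacent equal keys (objective: alternative algorithm of the same cost).

-- ===== PORT A =====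
-- A: build a dict summing values per key, then return sorted(dict.items()) (tuple-lexicographic sort).
def vector_to_dict (vector : List (String × Int)) : List (String × Int) :=
  let d := vector.foldl (fun d element =>
      let key := element.1
      let val := element.2
      -- 'dict[key] += val' reads the existing entry; inside the contains-branch getD's default is never used
      if d.contains key then d.insert key (d.getD key 0 + val) else d.insert key val)
    PySem.Dict.empty
  PySem.List.sorted2 d.items (fun p => p.1) (fun p => p.2)

-- ===== PORT B =====
-- 'if out and out[-1][0] == key: out[-1] = (key, out[-1][1] + val) else: out.append((key, val))'
def vtdStep (out : List (String × Int)) (element : String × Int) : List (String × Int) :=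
  match out.getLast? with
  | some last => if last.1 = element.1 then out.dropLast ++ [(element.1, last.2 + element.2)]
                 else out ++ [element]
  | none => out ++ [element]

def vector_to_dict_alt (vector : List (String × Int)) : List (String × Int) :=
  (PySem.List.sorted vector (fun e => e.1)).foldl vtdStep []

-- ===== PRECONDITION & SPEC =====
def Spec_vector_to_dict (vector : List (String × Int)) (out : List (String × Int)) : Prop := out = vector_to_dict_alt vector
instance (vector : List (String × Int)) (out : List (String × Int)) : Decidable (Spec_vector_to_dict vector out) := by unfold Spec_vector_to_dict; infer_instance

-- ===== CLAIM (what is proved, stated in full; the proofs are below) =====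
def Claim_equal_vector_to_dict : Prop := ∀ (vector : List (String × Int)), Dom_vector_to_dict vector → Spec_vector_to_dict vector (vector_to_dict vector)

-- ===== LEMMAS AND PROOFS =====

-- total of the values attached to key k in l
def pvTot (l : List (String × Int)) (k : String) : Int :=
  ((l.filter (fun p => p.1 == k)).map (fun p => p.2)).sum

-- recursive description of B's merge pass (last group carried as (k0, v0))
def pvMerge (k0 : String) (v0 : Int) : List (String × Int) → List (String × Int)
  | [] => [(k0, v0)]
  | (k, v) :: t => if k0 = k then pvMerge k0 (v0 + v) t else (k0, v0) :: pvMerge k v t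

-- ---- A side: the loop is a modify-fold, its items are keys paired with totals ----

lemma vtd_loop_eq_modify (vector : List (String × Int)) :
    vector.foldl (fun d element =>
      let key := element.1
      let val := element.2
      if d.contains key then d.insert key (d.getD key 0 + val) else d.insert key val)
      (PySem.Dict.empty : PySem.Dict String Int)
    = vector.foldl (fun d p => d.modify p.1 0 (· + p.2)) PySem.Dict.empty := by
  apply PySem.List.foldl_congr_mem
  intro d p _
  simp only [PySem.Dict.modify]
  by_cases h : d.contains p.1
  · simp [h]
  · simp only [Bool.not_eq_true] at h
    simp [h, PySem.Dict.getD_of_not_contains d 0 h]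

lemma getD_foldl_modify_sum (l : List (String × Int)) (d : PySem.Dict String Int) (k : String) :
    (l.foldl (fun d p => d.modify p.1 0 (· + p.2)) d).getD k 0 = d.getD k 0 + pvTot l k := by
  induction l generalizing d with
  | nil => simp [pvTot]
  | cons p t ih =>
    simp only [List.foldl_cons, ih, PySem.Dict.getD_modify, pvTot, List.filter_cons]
    by_cases h : p.1 = k
    · simp [h]; ring
    · simp [h, Ne.symm h]

lemma vtd_items (vector : List (String × Int)) :
    (vector.foldl (fun d p => d.modify p.1 0 (· + p.2)) (PySem.Dict.empty : PySem.Dict String Int)).items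
    = (PySem.Set.ofList (vector.map (fun p => p.1))).map (fun k => (k, pvTot vector k)) := by
  have hnd : (vector.foldl (fun d p => d.modify p.1 0 (· + p.2)) (PySem.Dict.empty : PySem.Dict String Int)).keys.Nodup :=
    PySem.Dict.nodup_keys_foldl_modify_key vector (fun p => p.1) 0 (fun _ p => (· + p.2)) _ PySem.Dict.nodup_keys_empty
  have hkeys : (vector.foldl (fun d p => d.modify p.1 0 (· + p.2)) (PySem.Dict.empty : PySem.Dict String Int)).keys
      = PySem.Set.ofList (vector.map (fun p => p.1)) := by
    have := PySem.Dict.keys_foldl_modify_key vector (fun p => p.1) (0 : Int) (fun _ p => (· + p.2)) PySem.Dict.empty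
    simpa [PySem.Set.update, PySem.Set.ofList] using this
  rw [PySem.Dict.items_eq_map_keys _ hnd 0, hkeys]
  apply List.map_congr_left
  intro k _
  simp [getD_foldl_modify_sum]

-- ---- generic: insertion sort only consults the comparator on pairs of input elements ----

lemma insertBy_congr {α : Type} (before before' : α → α → Bool) (x : α) :
    ∀ acc : List α, (∀ a ∈ acc, before x a = before' x a) →
      PySem.List.insertBy before x acc = PySem.List.insertBy before' x acc := by
  intro acc h
  induction acc with
  | nil => rfl
  | cons y ys ih =>
    simp only [PySem.List.insertBy]
    rw [h y (by simp)]
    split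
    · rfl
    · rw [ih (fun a ha => h a (by simp [ha]))]

lemma foldl_insertBy_congr {α : Type} (S : List α) (before before' : α → α → Bool)
    (h : ∀ a ∈ S, ∀ b ∈ S, before a b = before' a b) :
    ∀ (l acc : List α), (∀ x ∈ l, x ∈ S) → (∀ x ∈ acc, x ∈ S) →
      l.foldl (fun acc x => PySem.List.insertBy before x acc) acc
      = l.foldl (fun acc x => PySem.List.insertBy before' x acc) acc := by
  intro l
  induction l with
  | nil => intro acc _ _; rfl
  | cons x t ih =>
    intro acc hl hacc
    have hx : x ∈ S := hl x (by simp)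
    have heq : PySem.List.insertBy before x acc = PySem.List.insertBy before' x acc :=
      insertBy_congr before before' x acc (fun a ha => h x hx a (hacc a ha))
    simp only [List.foldl_cons, heq]
    exact ih _ (fun y hy => hl y (by simp [hy]))
      (fun y hy => ((PySem.List.mem_insertBy before' x y acc).1 hy).elim
        (fun h' => h' ▸ hx) (fun h' => hacc y h'))

lemma sorted2_eq_sorted_fst (xs : List (String × Int)) (h : (xs.map (fun p => p.1)).Nodup) :
    PySem.List.sorted2 xs (fun p => p.1) (fun p => p.2) = PySem.List.sorted xs (fun p => p.1) := by
  rw [PySem.List.sorted_eq_foldl_insertBy]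
  simp only [PySem.List.sorted2]
  apply foldl_insertBy_congr xs _ _ _ xs [] (fun _ hx => hx) (by simp)
  intro a ha b hb
  by_cases hab : a.1 = b.1
  · have : a = b := List.inj_on_of_nodup_map h ha hb hab
    subst this
    simp
  · rcases lt_or_gt_of_ne hab with hlt | hgt
    · simp [hlt]
    · simp [hgt, not_lt_of_gt hgt]

-- ---- B side: the fold is pvMerge, and pvMerge on a key-sorted list yields deduped keys with totals ----

lemma foldl_vtdStep (s : List (String × Int)) :
    ∀ (pre : List (String × Int)) (k0 : String) (v0 : Int),
      List.foldl vtdStep (pre ++ [(k0, v0)]) s = pre ++ pvMerge k0 v0 s := by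
  induction s with
  | nil => intro pre k0 v0; simp [pvMerge]
  | cons p t ih =>
    intro pre k0 v0
    obtain ⟨k, v⟩ := p
    rw [List.foldl_cons]
    have hstep : vtdStep (pre ++ [(k0, v0)]) (k, v)
        = if k0 = k then pre ++ [(k0, v0 + v)] else (pre ++ [(k0, v0)]) ++ [(k, v)] := by
      simp [vtdStep]
      split <;> simp_all
    rw [hstep]
    by_cases h : k0 = k
    · subst h
      rw [if_pos rfl, ih pre k0 (v0 + v)]
      simp [pvMerge]
    · rw [if_neg h, ih (pre ++ [(k0, v0)]) k v]
      simp [pvMerge, h]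

lemma set_add_cons_not_mem {α : Type} [BEq α] [LawfulBEq α] (a : α) :
    ∀ (l acc : List α), a ∉ l → l.foldl PySem.Set.add (a :: acc) = a :: l.foldl PySem.Set.add acc := by
  intro l
  induction l with
  | nil => intro acc _; rfl
  | cons x t ih =>
    intro acc hal
    have hax : x ≠ a := fun h => hal (by simp [h])
    simp only [List.foldl_cons]
    have : PySem.Set.add (a :: acc) x = a :: PySem.Set.add acc x := by
      simp [PySem.Set.add, PySem.Set.contains, hax]
      split <;> simp
    rw [this]
    exact ih (PySem.Set.add acc x) (fun h => hal (by simp [h]))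

lemma dedup_cons_not_mem {α : Type} [BEq α] [LawfulBEq α] (a : α) (l : List α) (h : a ∉ l) :
    PySem.List.dedup (a :: l) = a :: PySem.List.dedup l := by
  simp only [PySem.List.dedup, PySem.Set.ofList, List.foldl_cons]
  have h1 : PySem.Set.add PySem.Set.empty a = [a] := rfl
  rw [h1]
  exact set_add_cons_not_mem a l [] h

lemma dedup_cons_cons {α : Type} [BEq α] [LawfulBEq α] (a : α) (l : List α) :
    PySem.List.dedup (a :: a :: l) = PySem.List.dedup (a :: l) := by
  simp only [PySem.List.dedup, PySem.Set.ofList, List.foldl_cons]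
  have h1 : PySem.Set.add PySem.Set.empty a = [a] := rfl
  have h2 : PySem.Set.add [a] a = [a] := by simp [PySem.Set.add, PySem.Set.contains]
  rw [h1, h2]

lemma pvMerge_spec : ∀ (s : List (String × Int)) (k0 : String) (v0 : Int),
    ((k0, v0) :: s).Pairwise (fun a b => a.1 ≤ b.1) →
    pvMerge k0 v0 s
      = (PySem.List.dedup (((k0, v0) :: s).map (fun p => p.1))).map
          (fun k => (k, pvTot ((k0, v0) :: s) k)) := by
  intro s
  induction s with
  | nil =>
    intro k0 v0 _
    simp [pvMerge, PySem.List.dedup, PySem.Set.ofList, PySem.Set.add, pvTot]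
  | cons p t ih =>
    intro k0 v0 hpw
    obtain ⟨k, v⟩ := p
    by_cases h : k0 = k
    · subst h
      have hpw' : ((k0, v0 + v) :: t).Pairwise (fun a b => a.1 ≤ b.1) := by
        rcases List.pairwise_cons.1 hpw with ⟨_, h2⟩
        rcases List.pairwise_cons.1 h2 with ⟨h3, h4⟩
        exact List.pairwise_cons.2 ⟨h3, h4⟩
      have := ih k0 (v0 + v) hpw'
      simp only [pvMerge]
      rw [this]
      have hd : PySem.List.dedup (((k0, v0) :: (k0, v) :: t).map (fun p => p.1))
          = PySem.List.dedup (((k0, v0 + v) :: t).map (fun p => p.1)) := by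
        simpa using dedup_cons_cons k0 (t.map (fun p => p.1))
      rw [← hd]
      apply List.map_congr_left
      intro c _
      simp only [pvTot, List.filter_cons]
      by_cases hc : k0 = c
      · simp [hc]; ring
      · simp [hc]
    · -- new key: k0 < k and k0 below everything in t
      rcases List.pairwise_cons.1 hpw with ⟨hk0le, htail⟩
      have hk0k : k0 < k := lt_of_le_of_ne (hk0le (k, v) (by simp)) h
      have hk0t : ∀ q ∈ t, k0 < q.1 := fun q hq =>
        lt_of_lt_of_le hk0k ((List.pairwise_cons.1 htail).1 q hq)
      have hnotmem : k0 ∉ ((k, v) :: t).map (fun p => p.1) := by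
        intro hmem
        rcases List.mem_map.1 hmem with ⟨q, hq, hq1⟩
        rcases List.mem_cons.1 hq with rfl | hq'
        · exact ne_of_lt hk0k hq1.symm
        · exact absurd (hq1 ▸ hk0t q hq') (lt_irrefl k0)
      simp only [pvMerge, if_neg h]
      rw [ih k v htail]
      have hd : PySem.List.dedup (((k0, v0) :: (k, v) :: t).map (fun p => p.1))
          = k0 :: PySem.List.dedup (((k, v) :: t).map (fun p => p.1)) := by
        simpa using dedup_cons_not_mem k0 (((k, v) :: t).map (fun p => p.1)) hnotmem
      rw [hd]
      simp only [List.map_cons]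
      congr 1
      · -- head: total of k0 in the whole list is v0
        have hfil : (((k, v) :: t).filter (fun p => p.1 == k0)) = [] := by
          rw [List.filter_eq_nil_iff]
          intro q hq
          simp only [beq_iff_eq]
          intro hq1
          rcases List.mem_cons.1 hq with rfl | hq'
          · exact (ne_of_lt hk0k) hq1.symm
          · exact (ne_of_lt (hk0t q hq')) hq1.symm
        simp [pvTot, hfil]
      · -- tail: k0's head entry does not contribute to other keys
        apply List.map_congr_left
        intro c hc
        have hck0 : ¬ (k0 = c) := by
          intro hek
          subst hek
          exact hnotmem ((PySem.List.mem_dedup _ _).1 hc)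
        simp [pvTot, List.filter_cons, hck0]

-- dedup of a ≤-pairwise list is <-pairwise (dedup is a sublist and is nodup)
lemma foldl_add_sublist {α : Type} [BEq α] :
    ∀ (l acc : List α), (l.foldl PySem.Set.add acc).Sublist (acc ++ l) := by
  intro l
  induction l with
  | nil => intro acc; simp
  | cons x t ih =>
    intro acc
    simp only [List.foldl_cons]
    have h := ih (PySem.Set.add acc x)
    apply h.trans
    simp only [PySem.Set.add]
    split
    · exact (List.append_sublist_append_left acc).2 (List.sublist_cons_self x t)
    · simp
lemma dedup_sublist {α : Type} [BEq α] (l : List α) : (PySem.List.dedup l).Sublist l := by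
  simp only [PySem.List.dedup, PySem.Set.ofList]
  simpa using foldl_add_sublist l []

lemma dedup_pairwise_lt (l : List String) (h : l.Pairwise (· ≤ ·)) :
    (PySem.List.dedup l).Pairwise (· < ·) := by
  have h1 : (PySem.List.dedup l).Pairwise (· ≤ ·) := h.sublist (dedup_sublist l)
  have h2 : (PySem.List.dedup l).Nodup := by
    simp [PySem.List.dedup, PySem.Set.nodup_ofList]
  exact (h1.and h2).imp (fun hab => lt_of_le_of_ne hab.1 hab.2)

-- ===== VERDICT (by name: the statement is the Claim_ definition above) =====
theorem vector_to_dict_spec : Claim_equal_vector_to_dict := by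
  intro vector _
  unfold Spec_vector_to_dict
  -- names
  set s := PySem.List.sorted vector (fun e : String × Int => e.1) with hs
  have hsperm : s.Perm vector := PySem.List.sorted_perm vector _ false
  have hspw : s.Pairwise (fun a b => a.1 ≤ b.1) := PySem.List.sorted_pairwise vector _
  have htot : ∀ k, pvTot s k = pvTot vector k := by
    intro k
    exact ((hsperm.filter _).map _).sum_eq
  -- B's value
  have hB : vector_to_dict_alt vector
      = (PySem.List.dedup (s.map (fun p => p.1))).map (fun k => (k, pvTot vector k)) := by
    unfold vector_to_dict_alt
    rw [← hs]
    cases hcase : s with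
    | nil =>
      simp [PySem.List.dedup, PySem.Set.ofList, PySem.Set.empty]
    | cons p t =>
      obtain ⟨k, v⟩ := p
      have h0 : List.foldl vtdStep [] ((k, v) :: t) = pvMerge k v t := by
        rw [List.foldl_cons]
        have hstep : vtdStep [] (k, v) = [] ++ [(k, v)] := rfl
        rw [hstep]
        simpa using foldl_vtdStep t [] k v
      rw [h0, pvMerge_spec t k v (hcase ▸ hspw)]
      apply List.map_congr_left
      intro c _
      rw [← hcase, htot c]
  -- A's value
  unfold vector_to_dict
  rw [vtd_loop_eq_modify]
  set d := vector.foldl (fun d p => d.modify p.1 0 (· + p.2)) (PySem.Dict.empty : PySem.Dict String Int) with hd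
  have hitems : d.items = (PySem.Set.ofList (vector.map (fun p => p.1))).map (fun k => (k, pvTot vector k)) :=
    vtd_items vector
  have hndkeys : (d.items.map (fun p => p.1)).Nodup := by
    rw [hitems, List.map_map]
    have : ((fun p : String × Int => p.1) ∘ fun k => (k, pvTot vector k)) = id := rfl
    rw [this, List.map_id]
    exact PySem.Set.nodup_ofList _
  rw [sorted2_eq_sorted_fst d.items hndkeys]
  -- both sides are the same strictly-key-increasing rearrangement
  apply PySem.List.sorted_eq_of_perm_of_pairwise_lt
  · -- Perm: B's list is a permutation of d.items
    rw [hB, hitems]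
    apply List.Perm.map
    rw [List.perm_ext_iff_of_nodup (by simp [PySem.List.dedup, PySem.Set.nodup_ofList]) (PySem.Set.nodup_ofList _)]
    intro a
    rw [PySem.List.mem_dedup, PySem.Set.mem_ofList]
    constructor
    · intro h; exact (hsperm.map (fun p => p.1)).mem_iff.1 h
    · intro h; exact (hsperm.map (fun p => p.1)).mem_iff.2 h
  · -- Pairwise: B's keys strictly increase
    rw [hB]
    rw [List.pairwise_map]
    exact dedup_pairwise_lt _ (by rw [List.pairwise_map]; exact hspw)
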